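-- pv_equiv track=rewrite | github.com/lukasz-marek/za2017 | lab1/graham_scan.py | find_new_origin
-- ===== SOURCE A (Python) =====
-- def find_new_origin(coordinate_tuples_list):
--     # origin - min y, min x (bottom left)
--     new_origin = None
--     for x, y in coordinate_tuples_list:
--         if not new_origin:
--             new_origin = (x, y)
--         else:
--             origin_x, origin_y = new_origin
--             if y < origin_y or (y == origin_y and origin_x > x):
--                 new_origin = (x, y)
--     return new_origin
-- ===== SOURCE B (Python) =====
-- def find_new_origin(coordinate_tuples_list):
--     # sort by (y, x) and take the head instead of scanning for the minimum
--     if not coordinate_tuples_list: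
--         return None
--     x, y = sorted(coordinate_tuples_list, key=lambda p: (p[1], p[0]))[0]
--     return (x, y)
-- ===== Notes on version B (the rewrite author's own statement) =====
-- stated objective: alternative
-- what changed: B sorts the list by the key (y, x) and returns its first element instead of A's running-minimum scan with an Option accumulator.
import Mathlib
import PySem

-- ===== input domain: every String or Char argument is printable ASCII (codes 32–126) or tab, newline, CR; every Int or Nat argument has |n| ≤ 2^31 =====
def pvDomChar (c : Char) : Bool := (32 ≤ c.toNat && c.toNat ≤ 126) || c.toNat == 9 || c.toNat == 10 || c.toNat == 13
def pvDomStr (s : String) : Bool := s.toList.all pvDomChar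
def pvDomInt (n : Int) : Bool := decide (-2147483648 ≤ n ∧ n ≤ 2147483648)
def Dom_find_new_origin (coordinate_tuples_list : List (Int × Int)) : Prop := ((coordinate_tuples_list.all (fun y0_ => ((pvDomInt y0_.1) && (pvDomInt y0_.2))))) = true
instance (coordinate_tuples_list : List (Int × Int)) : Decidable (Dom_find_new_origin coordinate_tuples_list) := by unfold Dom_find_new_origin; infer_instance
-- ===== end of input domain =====

-- B replaces A's running-minimum scan by sort-by-(y,x)-then-take-head (alternative algorithm, not faster).

-- ===== PORT A =====
-- A: loop over the points keeping the current best in an Option accumulator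
-- (a non-empty tuple is truthy in Python, so 'not new_origin' is exactly 'is None').
def find_new_origin (coordinate_tuples_list : List (Int × Int)) : Option (Int × Int) :=
  coordinate_tuples_list.foldl
    (fun new_origin p =>
      match new_origin with
      | none => some (p.1, p.2)
      | some (origin_x, origin_y) =>
          if p.2 < origin_y ∨ (p.2 = origin_y ∧ origin_x > p.1) then some (p.1, p.2)
          else some (origin_x, origin_y))
    none

-- ===== PORT B =====
-- B: guard the empty list, sort by key (p.2, p.1), unpack the head and rebuild the pair.
-- The '[]' branch of the inner match is Python's sorted(..)[0] IndexError; it is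
-- unreachable because the list was checked non-empty.
def find_new_origin_alt (coordinate_tuples_list : List (Int × Int)) : Option (Int × Int) :=
  match coordinate_tuples_list with
  | [] => none
  | _ :: _ =>
      match PySem.List.sorted2 coordinate_tuples_list (fun p => p.2) (fun p => p.1) with
      | [] => none
      | (x, y) :: _ => some (x, y)

-- ===== PRECONDITION & SPEC =====
def Spec_find_new_origin (coordinate_tuples_list : List (Int × Int)) (out : Option (Int × Int)) : Prop := out = find_new_origin_alt coordinate_tuples_list
instance (coordinate_tuples_list : List (Int × Int)) (out : Option (Int × Int)) : Decidable (Spec_find_new_origin coordinate_tuples_list out) := by unfold Spec_find_new_origin; infer_instance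

-- ===== CLAIM (what is proved, stated in full; the proofs are below) =====
def Claim_equal_find_new_origin : Prop := ∀ (coordinate_tuples_list : List (Int × Int)), Dom_find_new_origin coordinate_tuples_list → Spec_find_new_origin coordinate_tuples_list (find_new_origin coordinate_tuples_list)

-- ===== LEMMAS AND PROOFS =====

-- the (y, x)-lexicographic order the function minimises
def pvLe (a b : Int × Int) : Prop := a.2 < b.2 ∨ (a.2 = b.2 ∧ a.1 ≤ b.1)

theorem pvLe_trans {a b c : Int × Int} (h1 : pvLe a b) (h2 : pvLe b c) : pvLe a c := by
  unfold pvLe at *; omega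

theorem pvLe_antisymm {a b : Int × Int} (h1 : pvLe a b) (h2 : pvLe b a) : a = b := by
  unfold pvLe at *
  have : a.1 = b.1 ∧ a.2 = b.2 := by omega
  exact Prod.ext this.1 this.2

-- the comparator sorted2 uses, on this key
def pvBefore (a b : Int × Int) : Bool :=
  decide (a.2 < b.2) || !decide (b.2 < a.2) && decide (a.1 < b.1)

theorem pvLe_of_before {a b : Int × Int} (h : pvBefore a b = true) : pvLe a b := by
  unfold pvBefore at h; unfold pvLe
  simp only [Bool.or_eq_true, Bool.and_eq_true, Bool.not_eq_true', decide_eq_true_eq,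
    decide_eq_false_iff_not] at h
  omega

theorem pvLe_of_not_before {a b : Int × Int} (h : pvBefore a b = false) : pvLe b a := by
  unfold pvBefore at h; unfold pvLe
  simp only [Bool.or_eq_false_iff, Bool.and_eq_false_iff, Bool.not_eq_false',
    decide_eq_true_eq, decide_eq_false_iff_not] at h
  omega

-- head-of-accumulator invariant for the insertion sort
def pvHeadMin (l : List (Int × Int)) : Prop :=
  ∀ m t, l = m :: t → ∀ y ∈ l, pvLe m y

theorem pvHeadMin_nil : pvHeadMin [] := by intro m t h; cases h

theorem pvHeadMin_insertBy (x : Int × Int) (acc : List (Int × Int)) (h : pvHeadMin acc) :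
    pvHeadMin (PySem.List.insertBy pvBefore x acc) := by
  cases acc with
  | nil =>
      intro m t hm y hy
      simp only [PySem.List.insertBy] at hm hy
      cases hm
      simp only [List.mem_singleton] at hy
      subst hy; exact Or.inr ⟨rfl, le_refl _⟩
  | cons a as =>
      intro m t hm y hy
      have hha : ∀ y ∈ a :: as, pvLe a y := h a as rfl
      simp only [PySem.List.insertBy] at hm hy
      by_cases hb : pvBefore x a = true
      · simp only [hb, if_true] at hm hy
        cases hm
        rcases List.mem_cons.mp hy with h1 | h2
        · subst h1; exact Or.inr ⟨rfl, le_refl _⟩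
        · exact pvLe_trans (pvLe_of_before hb) (hha y h2)
      · simp only [hb] at hm hy
        have hxa : pvLe a x := pvLe_of_not_before (by simpa using hb)
        cases hm
        rcases List.mem_cons.mp hy with h1 | h2
        · subst h1; exact Or.inr ⟨rfl, le_refl _⟩
        · rcases (PySem.List.mem_insertBy pvBefore x y as).mp h2 with h3 | h4
          · subst h3; exact hxa
          · exact hha y (List.mem_cons_of_mem a h4)

theorem pvHeadMin_foldl (xs : List (Int × Int)) (acc : List (Int × Int)) (h : pvHeadMin acc) :
    pvHeadMin (xs.foldl (fun acc x => PySem.List.insertBy pvBefore x acc) acc) := by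
  induction xs generalizing acc with
  | nil => exact h
  | cons x xs ih => exact ih _ (pvHeadMin_insertBy x acc h)

-- the head of sorted2 (key (y,x)) is pvLe-minimal over the input
theorem pv_sorted2_head_min (xs : List (Int × Int)) (m : Int × Int) (t : List (Int × Int))
    (hs : PySem.List.sorted2 xs (fun p => p.2) (fun p => p.1) = m :: t) :
    m ∈ xs ∧ ∀ y ∈ xs, pvLe m y := by
  have hperm := PySem.List.sorted2_perm xs (fun p => p.2) (fun p => p.1) false
  have hmin : pvHeadMin (PySem.List.sorted2 xs (fun p => p.2) (fun p => p.1)) := by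
    show pvHeadMin (xs.foldl (fun acc x => PySem.List.insertBy pvBefore x acc) [])
    exact pvHeadMin_foldl xs [] pvHeadMin_nil
  constructor
  · exact hperm.mem_iff.mp (by rw [hs]; exact List.mem_cons_self)
  · intro y hy
    exact hmin m t hs y (by rw [← hs] at *; exact hperm.mem_iff.mpr hy)

-- A's accumulator step
def pvStep (new_origin : Option (Int × Int)) (p : Int × Int) : Option (Int × Int) :=
  match new_origin with
  | none => some (p.1, p.2)
  | some (origin_x, origin_y) =>
      if p.2 < origin_y ∨ (p.2 = origin_y ∧ origin_x > p.1) then some (p.1, p.2)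
      else some (origin_x, origin_y)

-- A's fold from a seeded accumulator returns a pvLe-minimum of seed and tail
theorem pv_foldA_min (xs : List (Int × Int)) (m : Int × Int) :
    ∃ m', xs.foldl pvStep (some m) = some m' ∧ (m' = m ∨ m' ∈ xs) ∧ pvLe m' m ∧
      ∀ y ∈ xs, pvLe m' y := by
  induction xs generalizing m with
  | nil => exact ⟨m, rfl, Or.inl rfl, Or.inr ⟨rfl, le_refl _⟩, by simp⟩
  | cons x xs ih =>
      by_cases hc : x.2 < m.2 ∨ (x.2 = m.2 ∧ m.1 > x.1)
      · obtain ⟨m', h1, h2, h3, h4⟩ := ih x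
        refine ⟨m', ?_, ?_, ?_, ?_⟩
        · simpa [List.foldl_cons, pvStep, hc] using h1
        · rcases h2 with h | h
          · exact Or.inr (h ▸ List.mem_cons_self)
          · exact Or.inr (List.mem_cons_of_mem x h)
        · have hxm : pvLe x m := by unfold pvLe; omega
          exact pvLe_trans h3 hxm
        · intro y hy
          rcases List.mem_cons.mp hy with h | h
          · subst h; exact h3
          · exact h4 y h
      · obtain ⟨m', h1, h2, h3, h4⟩ := ih m
        refine ⟨m', ?_, ?_, h3, ?_⟩
        · simpa [List.foldl_cons, pvStep, hc] using h1
        · rcases h2 with h | h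
          · exact Or.inl h
          · exact Or.inr (List.mem_cons_of_mem x h)
        · intro y hy
          rcases List.mem_cons.mp hy with h | h
          · exact pvLe_trans h3 (by rw [h]; unfold pvLe; omega)
          · exact h4 y h

theorem pv_find_eq_fold (xs : List (Int × Int)) :
    find_new_origin xs = xs.foldl pvStep none := by
  unfold find_new_origin
  apply PySem.List.foldl_congr_mem
  intro acc a _
  cases acc with
  | none => rfl
  | some q => rfl

-- ===== VERDICT (by name: the statement is the Claim_ definition above) =====
theorem find_new_origin_spec : Claim_equal_find_new_origin := by
  intro xs _
  unfold Spec_find_new_origin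
  cases hx : xs with
  | nil => rfl
  | cons a as =>
      subst hx
      unfold find_new_origin_alt
      cases hs : PySem.List.sorted2 (a :: as) (fun p => p.2) (fun p => p.1) with
      | nil =>
          exact absurd ((PySem.List.sorted2_perm (a :: as) _ _ false).symm.mem_iff.mp
            List.mem_cons_self) (by rw [hs]; simp)
      | cons m t =>
          obtain ⟨hmem, hmin⟩ := pv_sorted2_head_min (a :: as) m t hs
          rw [pv_find_eq_fold]
          simp only [List.foldl_cons]
          have hnone : pvStep none a = some (a.1, a.2) := rfl
          rw [hnone]
          obtain ⟨m', h1, h2, h3, h4⟩ := pv_foldA_min as (a.1, a.2)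
          rw [h1]
          have hm'mem : m' ∈ a :: as := by
            rcases h2 with h | h
            · subst h; exact List.mem_cons_self
            · exact List.mem_cons_of_mem a h
          have hm'min : ∀ y ∈ a :: as, pvLe m' y := by
            intro y hy
            rcases List.mem_cons.mp hy with h | h
            · subst h; exact h3
            · exact h4 y h
          have : m' = m := pvLe_antisymm (hm'min m hmem) (hmin m' hm'mem)
          subst this
          rfl
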